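-- pv_equiv track=rewrite | github.com/sofia-frenk/TicTacToePy | tic_tac_toe_proj.py | IsSpaceFree
-- ===== SOURCE A (Python) =====
-- def IsSpaceFree(Board, i ,j):
--     '''
--     Parameters: Board is the game board, a 3x3 matrix
--                 i is the row index, j is the col index
--     Return: True or False
--     Description:
--         (1) return True  if Board[i][j] is empty (' ')
--         (2) return False if Board[i][j] is not empty
--         (3) return False if i or j is invalid (e.g. i = -1 or 100)
--         think about the order of (1) (2) (3)
--     '''
--     if (i<0 and i>2) or (j<0 and j>2):
--         return False
--
--     for row in range(0, len(Board)):
--         for col in range(0, len(Board[row])):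
--             if i == row and j == col:
--                 if Board[i][j] == ' ':
--                     return True
--                 else:
--                     return False
-- ===== SOURCE B (Python) =====
-- def IsSpaceFree(Board, i, j):
--     # Direct bounds check instead of scanning all cells; falls off the end
--     # (returning None) when (i, j) is out of range, exactly like A.
--     if 0 <= i < len(Board) and 0 <= j < len(Board[i]):
--         return Board[i][j] == ' '
-- ===== Notes on version B (the rewrite author's own statement) =====
-- stated objective: simpler
-- what changed: Replaced the nested scan over every (row, col) pair looking for (i, j) with a direct bounds check and indexed access; A's always-false guard is dropped.
import Mathlib
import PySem

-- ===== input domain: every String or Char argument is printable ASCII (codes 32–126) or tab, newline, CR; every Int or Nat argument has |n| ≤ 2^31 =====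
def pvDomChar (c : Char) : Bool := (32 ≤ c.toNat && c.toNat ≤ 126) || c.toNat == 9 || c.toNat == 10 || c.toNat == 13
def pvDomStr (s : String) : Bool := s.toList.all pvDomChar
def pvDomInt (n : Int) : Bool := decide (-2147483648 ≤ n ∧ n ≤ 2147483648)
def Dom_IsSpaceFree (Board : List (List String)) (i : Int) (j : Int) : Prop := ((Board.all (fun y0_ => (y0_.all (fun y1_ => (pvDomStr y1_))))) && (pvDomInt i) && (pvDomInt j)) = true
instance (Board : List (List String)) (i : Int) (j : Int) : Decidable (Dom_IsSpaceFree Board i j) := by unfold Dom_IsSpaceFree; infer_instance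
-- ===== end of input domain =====

-- B replaces A's full scan of all (row, col) pairs by a direct bounds check and
-- indexed access; both return none when (i, j) is out of range.

-- ===== PORT A =====
-- inner 'for col in range(0, len(Board[row]))' loop
def pvColLoopA (Board : List (List String)) (i : Int) (j : Int) (row : Int) :
    List Int → Option Bool
  | [] => none
  | col :: cols =>
    if i = row ∧ j = col then
      if ((PySem.List.pyGet? Board i).bind (fun r => PySem.List.pyGet? r j)) = some " " then
        some true
      else
        some false
    else pvColLoopA Board i j row cols

-- outer 'for row in range(0, len(Board))' loop
def pvRowLoopA (Board : List (List String)) (i : Int) (j : Int) :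
    List Int → Option Bool
  | [] => none
  | row :: rows =>
    match pvColLoopA Board i j row
        (PySem.List.pyRange 0 ((PySem.List.pyGetD Board row []).length : Int) 1) with
    | some b => some b
    | none => pvRowLoopA Board i j rows

def IsSpaceFree (Board : List (List String)) (i : Int) (j : Int) : Option Bool :=
  if (i < 0 ∧ i > 2) ∨ (j < 0 ∧ j > 2) then some false
  else pvRowLoopA Board i j (PySem.List.pyRange 0 (Board.length : Int) 1)

-- ===== PORT B =====
def IsSpaceFree_alt (Board : List (List String)) (i : Int) (j : Int) : Option Bool :=
  if 0 ≤ i ∧ i < (Board.length : Int) then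
    match PySem.List.pyGet? Board i with
    | none => none
    | some row =>
      if 0 ≤ j ∧ j < (row.length : Int) then
        match PySem.List.pyGet? row j with
        | none => none
        | some c => some (c == " ")
      else none
  else none

-- ===== PRECONDITION & SPEC =====
def Spec_IsSpaceFree (Board : List (List String)) (i : Int) (j : Int) (out : Option Bool) : Prop := out = IsSpaceFree_alt Board i j
instance (Board : List (List String)) (i : Int) (j : Int) (out : Option Bool) : Decidable (Spec_IsSpaceFree Board i j out) := by unfold Spec_IsSpaceFree; infer_instance

-- ===== CLAIM (what is proved, stated in full; the proofs are below) =====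
def Claim_equal_IsSpaceFree : Prop := ∀ (Board : List (List String)) (i : Int) (j : Int), Dom_IsSpaceFree Board i j → Spec_IsSpaceFree Board i j (IsSpaceFree Board i j)

-- ===== LEMMAS AND PROOFS =====

-- the inner loop hits only at row = i, col = j
theorem pvColLoopA_eq (Board : List (List String)) (i j row : Int) (cols : List Int) :
    pvColLoopA Board i j row cols =
      if i = row ∧ j ∈ cols then
        (if ((PySem.List.pyGet? Board i).bind (fun r => PySem.List.pyGet? r j)) = some " " then
          some true else some false)
      else none := by
  induction cols with
  | nil => simp [pvColLoopA]
  | cons c cs ih =>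
    simp only [pvColLoopA, ih, List.mem_cons]
    by_cases hi : i = row
    · by_cases hj : j = c
      · simp [hi, hj]
      · by_cases hm : j ∈ cs <;> simp [hi, hj, hm]
    · simp [hi]

-- the outer loop over any list of row indices
theorem pvRowLoopA_eq (Board : List (List String)) (i j : Int) (rows : List Int) :
    pvRowLoopA Board i j rows =
      if i ∈ rows ∧ 0 ≤ j ∧ j < ((PySem.List.pyGetD Board i []).length : Int) then
        (if ((PySem.List.pyGet? Board i).bind (fun r => PySem.List.pyGet? r j)) = some " " then
          some true else some false)
      else none := by
  induction rows with
  | nil => simp [pvRowLoopA]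
  | cons r rs ih =>
    simp only [pvRowLoopA, pvColLoopA_eq]
    by_cases hi : i = r
    · subst hi
      by_cases hj : 0 ≤ j ∧ j < ((PySem.List.pyGetD Board i []).length : Int)
      · by_cases hQ : ((PySem.List.pyGet? Board i).bind fun r => PySem.List.pyGet? r j) = some " " <;>
          simp [hQ, hj.1, hj.2, PySem.List.mem_pyRange_one]
      · rw [if_neg (fun h => hj ((PySem.List.mem_pyRange_one).1 h.2)), ih,
            if_neg (fun h => hj h.2), if_neg (fun h => hj h.2)]
    · rw [if_neg (fun h => hi h.1), ih]
      simp only [List.mem_cons]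
      simp [hi]

-- ===== VERDICT (by name: the statement is the Claim_ definition above) =====
theorem IsSpaceFree_spec : Claim_equal_IsSpaceFree := by
  intro Board i j _
  unfold Spec_IsSpaceFree IsSpaceFree IsSpaceFree_alt
  have hguard : ¬ ((i < 0 ∧ i > 2) ∨ (j < 0 ∧ j > 2)) := by omega
  rw [if_neg hguard, pvRowLoopA_eq]
  by_cases hi : 0 ≤ i ∧ i < (Board.length : Int)
  · have hmem : i ∈ PySem.List.pyRange 0 (Board.length : Int) 1 := by
      rw [PySem.List.mem_pyRange_one]; exact hi
    have hget : PySem.List.pyGet? Board i = some (Board[i.toNat]'(by omega)) := by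
      rw [PySem.List.pyGet?_of_nonneg Board hi.1]
      exact List.getElem?_eq_getElem (by omega)
    have hgetD : PySem.List.pyGetD Board i [] = Board[i.toNat]'(by omega) := by
      simp [PySem.List.pyGetD, hget]
    rw [if_pos hi]
    by_cases hj : 0 ≤ j ∧ j < ((Board[i.toNat]'(by omega) : List String).length : Int)
    · have hgetj : PySem.List.pyGet? (Board[i.toNat]'(by omega)) j =
          some ((Board[i.toNat]'(by omega))[j.toNat]'(by omega)) := by
        rw [PySem.List.pyGet?_of_nonneg _ hj.1]
        exact List.getElem?_eq_getElem (by omega)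
      rw [if_pos ⟨hmem, by rw [hgetD]; exact hj⟩]
      simp only [hget, hgetj, Option.bind_some]
      simp only [hj]
      by_cases hc : (Board[i.toNat]'(by omega))[j.toNat]'(by omega) = " " <;> simp [hc]
    · rw [if_neg (by rw [hgetD]; exact fun h => hj ⟨h.2.1, h.2.2⟩)]
      simp only [hget]
      simp [hj]
  · have hmem : i ∉ PySem.List.pyRange 0 (Board.length : Int) 1 := by
      rw [PySem.List.mem_pyRange_one]; exact hi
    rw [if_neg (fun h => hmem h.1), if_neg hi]
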